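-- pv_equiv track=rewrite | github.com/blacksmithalex/ege_computer_science | Kpolyakov/25/2857.py | iscube
-- ===== SOURCE A (Python) =====
-- def iscube(n):
--     '''
--     :param n: целое неотрицательное число
--     :return: -1, если n не является 3 степенью целого числа, в противном случае - результат взятия корня 3 степени
--     '''
--     l = -1
--     r = n
--     while l + 1 != r:
--         c = (l + r) // 2
--         if c**3 < n:
--             l = c
--         else:
--             r = c
--     if r**3 == n:
--         return r
--     else:
--         return -1
-- ===== SOURCE B (Python) =====
-- def iscube(n):
--     k = 0
--     while k * k * k < n:
--         k += 1
--     return k if k * k * k == n else -1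
-- ===== Notes on version B (the rewrite author's own statement) =====
-- stated objective: simpler
-- what changed: Replaces the bisection over an interval [l, r] by a single plain upward scan k = 0, 1, 2, ... until k^3 >= n, then the same perfect-cube test.
-- outside the precondition, e.g. on iscube(-1): A does not finish within the time limit, B returns -1
import Mathlib
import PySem

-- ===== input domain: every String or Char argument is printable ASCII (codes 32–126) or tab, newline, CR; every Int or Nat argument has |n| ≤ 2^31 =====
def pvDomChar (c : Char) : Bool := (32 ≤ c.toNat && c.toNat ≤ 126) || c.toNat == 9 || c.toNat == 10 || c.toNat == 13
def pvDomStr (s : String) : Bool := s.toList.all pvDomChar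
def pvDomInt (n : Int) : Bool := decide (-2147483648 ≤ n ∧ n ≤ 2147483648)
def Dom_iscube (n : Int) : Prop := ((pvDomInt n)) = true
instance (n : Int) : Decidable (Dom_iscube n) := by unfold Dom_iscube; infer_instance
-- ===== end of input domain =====

-- B replaces A's bisection by a plain upward scan k = 0,1,2,... until k^3 ≥ n (simpler, same exact result on n ≥ 0).


-- ===== PORT A =====
-- A's while loop; the guard 'l + 1 < r' (rather than Python's 'l + 1 ≠ r') is a totality
-- guard only: for every n ≥ 0 the loop state always has l < r, so the two guards coincide
-- there; on n < 0 Python's loop never terminates (excluded by Pre_iscube).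
def iscubeLoopA (n l r : Int) : Int :=
  if h : l + 1 < r then
    if (PySem.Int.floordiv (l + r) 2) ^ 3 < n then
      iscubeLoopA n (PySem.Int.floordiv (l + r) 2) r
    else
      iscubeLoopA n l (PySem.Int.floordiv (l + r) 2)
  else r
termination_by (r - l).toNat
decreasing_by
  all_goals
    rw [PySem.Int.floordiv_eq_ediv_of_pos (by norm_num)]
    omega

def iscube (n : Int) : Int :=
  let r := iscubeLoopA n (-1) n
  if r ^ 3 = n then r else -1

-- ===== PORT B =====
-- B's while loop: count k upward (a Nat, as in Source B k starts at 0 and only increments)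
def iscubeLoopB (n : Int) (k : Nat) : Nat :=
  if h : (k : Int) * k * k < n then iscubeLoopB n (k + 1) else k
termination_by (n - k).toNat
decreasing_by
  have hk : (k : Int) ≤ (k : Int) * k * k := by
    rcases Nat.eq_zero_or_pos k with h0 | h0
    · subst h0; simp
    · have h1 : (1 : Int) ≤ k := by exact_mod_cast h0
      nlinarith
  omega

def iscube_alt (n : Int) : Int :=
  let k : Int := iscubeLoopB n 0
  if k * k * k = n then k else -1

-- ===== PRECONDITION & SPEC =====
-- Pre_ excludes n < 0, on which Python A's bisection loop never terminates (l stays -1, r stays n).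
def Pre_iscube (n : Int) : Prop := 0 ≤ n
instance (n : Int) : Decidable (Pre_iscube n) := by unfold Pre_iscube; infer_instance
def pvWitness_iscube : Int := 27
def Spec_iscube (n : Int) (out : Int) : Prop := out = iscube_alt n
instance (n : Int) (out : Int) : Decidable (Spec_iscube n out) := by unfold Spec_iscube; infer_instance

-- ===== CLAIM (what is proved, stated in full; the proofs are below) =====
def Claim_equal_iscube : Prop := ∀ (n : Int), Dom_iscube n → Pre_iscube n → Spec_iscube n (iscube n)

-- ===== LEMMAS AND PROOFS =====

theorem cube_le_cube {a b : Int} (h : a ≤ b) : a ^ 3 ≤ b ^ 3 := by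
  nlinarith [sq_nonneg (a + b), sq_nonneg (a - b), sq_nonneg a, sq_nonneg b]

-- uniqueness of the m with (m-1)^3 < n ≤ m^3
theorem cube_bracket_unique {m m' n : Int}
    (h1 : (m - 1) ^ 3 < n) (h2 : n ≤ m ^ 3)
    (h1' : (m' - 1) ^ 3 < n) (h2' : n ≤ m' ^ 3) : m = m' := by
  rcases lt_trichotomy m m' with h | h | h
  · have : m ^ 3 ≤ (m' - 1) ^ 3 := cube_le_cube (by omega)
    omega
  · exact h
  · have : m' ^ 3 ≤ (m - 1) ^ 3 := cube_le_cube (by omega)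
    omega

theorem loopA_char (n : Int) : ∀ l r : Int, l ^ 3 < n → n ≤ r ^ 3 → l < r →
    (iscubeLoopA n l r - 1) ^ 3 < n ∧ n ≤ (iscubeLoopA n l r) ^ 3 := by
  intro l r
  induction l, r using iscubeLoopA.induct n with
  | case1 l r h hc ih =>
    intro hl hr hlr
    rw [iscubeLoopA, dif_pos h, if_pos hc]
    have hm := PySem.Int.floordiv_two_mid_bounds (by omega : l + 1 ≤ r - 1)
    have hsum : (l + 1) + (r - 1) = l + r := by ring
    rw [hsum] at hm
    exact ih hc hr (by omega)
  | case2 l r h hc ih =>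
    intro hl hr hlr
    rw [iscubeLoopA, dif_pos h, if_neg hc]
    have hm := PySem.Int.floordiv_two_mid_bounds (by omega : l + 1 ≤ r - 1)
    have hsum : (l + 1) + (r - 1) = l + r := by ring
    rw [hsum] at hm
    exact ih hl (by omega) (by omega)
  | case3 l r h =>
    intro hl hr hlr
    rw [iscubeLoopA, dif_neg h]
    have : l = r - 1 := by omega
    subst this
    exact ⟨hl, hr⟩

theorem loopB_char (n : Int) : ∀ k : Nat, ((k : Int) - 1) ^ 3 < n →
    ((iscubeLoopB n k : Int) - 1) ^ 3 < n ∧ n ≤ (iscubeLoopB n k : Int) ^ 3 := by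
  intro k
  induction k using iscubeLoopB.induct n with
  | case1 k h ih =>
    intro hk
    rw [iscubeLoopB]
    simp only [dif_pos h]
    exact ih (by push_cast; nlinarith)
  | case2 k h =>
    intro hk
    rw [iscubeLoopB]
    simp only [dif_neg h]
    refine ⟨hk, by nlinarith⟩

-- ===== VERDICT (by name: the statement is the Claim_ definition above) =====
theorem iscube_spec : Claim_equal_iscube := by
  intro n _ hn
  unfold Spec_iscube iscube iscube_alt
  by_cases h0 : n = 0
  · subst h0
    rw [iscubeLoopA, iscubeLoopB]
    norm_num
  · have hn0 : (0:Int) ≤ n := hn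
    have hn1 : 1 ≤ n := by omega
    have hcube : n ≤ n ^ 3 := by nlinarith [sq_nonneg n, sq_nonneg (n - 1)]
    have hA := loopA_char n (-1) n (by nlinarith) hcube (by omega)
    have hB := loopB_char n 0 (by norm_num; omega)
    have heq : iscubeLoopA n (-1) n = (iscubeLoopB n 0 : Int) :=
      cube_bracket_unique hA.1 hA.2 hB.1 hB.2
    simp only [heq]
    have : ((iscubeLoopB n 0 : Int)) ^ 3 = (iscubeLoopB n 0 : Int) * iscubeLoopB n 0 * iscubeLoopB n 0 := by ring
    rw [← this]
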